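-- pv_equiv track=rewrite | github.com/yunzhuz/code-offer | second/20.py | isright
-- ===== SOURCE A (Python) =====
-- def isright(s):  ##指数部分必须为整数
--     allstring = ['0','1','2','3','4','5','6','7','8','9','+','-']
--     for i in range(len(s)):
--         if s[i] not in allstring:
--             return False
--         if (s[i] == '+' and i != 0) or (s[i] == '-' and i!=0):
--             return False
--     return True
-- ===== SOURCE B (Python) =====
-- import re
--
-- _EXP_RE = re.compile(r'[+-]?[0-9]*')
--
-- def isright(s):
--     return _EXP_RE.fullmatch(s) is not None
-- ===== Notes on version B (the rewrite author's own statement) =====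
-- stated objective: idiomatic
-- what changed: Replaced the index loop with membership tests by a single anchored regular expression [+-]?[0-9]* matched with re.fullmatch.
import Mathlib
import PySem

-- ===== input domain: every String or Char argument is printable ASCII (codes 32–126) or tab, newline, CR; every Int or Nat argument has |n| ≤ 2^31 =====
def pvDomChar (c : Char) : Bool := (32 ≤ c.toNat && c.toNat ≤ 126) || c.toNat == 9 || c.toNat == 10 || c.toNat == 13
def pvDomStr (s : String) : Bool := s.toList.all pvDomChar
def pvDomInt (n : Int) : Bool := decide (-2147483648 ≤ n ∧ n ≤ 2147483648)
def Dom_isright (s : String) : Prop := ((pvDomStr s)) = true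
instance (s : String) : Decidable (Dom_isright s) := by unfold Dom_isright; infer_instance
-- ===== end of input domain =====

-- B replaces A's index loop by a regex [+-]?[0-9]* (optional leading sign, then digits); same return values.

-- ===== PORT A =====
-- A's allstring list
def isrightAllstring : List Char :=
  ['0','1','2','3','4','5','6','7','8','9','+','-']

-- the 'for i in range(len(s))' loop with its two early returns, as index recursion
def isrightLoop (l : List Char) (i : Nat) : Bool :=
  match l with
  | [] => true
  | c :: t =>
    if ¬ (c ∈ isrightAllstring) then false
    else if (c = '+' ∧ i ≠ 0) ∨ (c = '-' ∧ i ≠ 0) then false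
    else isrightLoop t (i + 1)

def isright (s : String) : Bool := isrightLoop s.toList 0

-- ===== PORT B =====
-- exact port of the regex [+-]?[0-9]* under re.fullmatch: an optional leading
-- '+'/'-' followed by zero or more ASCII digits '0'-'9', anchored at both ends
def isrightDigit (c : Char) : Bool := '0' ≤ c ∧ c ≤ '9'

def isright_alt (s : String) : Bool :=
  match s.toList with
  | [] => true
  | c :: t =>
    if c = '+' ∨ c = '-' then t.all isrightDigit
    else (c :: t).all isrightDigit

-- ===== PRECONDITION & SPEC =====
def Spec_isright (s : String) (out : Bool) : Prop := out = isright_alt s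
instance (s : String) (out : Bool) : Decidable (Spec_isright s out) := by unfold Spec_isright; infer_instance

-- ===== CLAIM (what is proved, stated in full; the proofs are below) =====
def Claim_equal_isright : Prop := ∀ (s : String), Dom_isright s → Spec_isright s (isright s)

-- ===== LEMMAS AND PROOFS =====

-- a digit character is in A's allstring
theorem digit_mem (c : Char) (hd : isrightDigit c = true) : c ∈ isrightAllstring := by
  simp only [isrightDigit, decide_eq_true_eq, Char.le_def, UInt32.le_iff_toNat_le] at hd
  have h48 : ('0':Char).val.toNat = 48 := by decide
  have h57 : ('9':Char).val.toNat = 57 := by decide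
  rw [h48] at hd; rw [h57] at hd
  obtain ⟨h1, h2⟩ := hd
  simp only [isrightAllstring, List.mem_cons, List.not_mem_nil, or_false,
    Char.ext_iff, UInt32.ext_iff]
  interval_cases h : c.val.toNat <;> simp_all

-- a member of allstring other than '+','-' is a digit
theorem mem_digit (c : Char) (hmem : c ∈ isrightAllstring) (h1 : c ≠ '+') (h2 : c ≠ '-') :
    isrightDigit c = true := by
  simp only [isrightAllstring, List.mem_cons, List.not_mem_nil, or_false] at hmem
  rcases hmem with h|h|h|h|h|h|h|h|h|h|h|h <;>
    first
    | (subst h; decide)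
    | (exact absurd h h1)
    | (exact absurd h h2)

-- at any positive index, the loop accepts exactly a run of digits
theorem isrightLoop_pos (l : List Char) (n : Nat) :
    isrightLoop l (n + 1) = l.all isrightDigit := by
  induction l generalizing n with
  | nil => rfl
  | cons c t ih =>
    simp only [isrightLoop, List.all_cons]
    by_cases hd : isrightDigit c = true
    · have hmem := digit_mem c hd
      have hplus : c ≠ '+' := by
        intro h; subst h; simp [isrightDigit, Char.le_def] at hd
      have hminus : c ≠ '-' := by
        intro h; subst h; simp [isrightDigit, Char.le_def] at hd
      simp [hmem, hplus, hminus, hd, ih]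
    · have hnd : isrightDigit c = false := by simpa using hd
      by_cases hmem : c ∈ isrightAllstring
      · have hpm : c = '+' ∨ c = '-' := by
          by_contra h
          push_neg at h
          exact hd (mem_digit c hmem h.1 h.2)
        rcases hpm with h | h <;> subst h <;> simp [hnd]
      · simp [hmem, hnd]

-- ===== VERDICT (by name: the statement is the Claim_ definition above) =====
theorem isright_spec : Claim_equal_isright := by
  intro s _
  unfold Spec_isright isright isright_alt
  cases h : s.toList with
  | nil => rfl
  | cons c t =>
    simp only [isrightLoop]
    by_cases hpm : c = '+' ∨ c = '-'
    · have hmem : c ∈ isrightAllstring := by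
        rcases hpm with h|h <;> subst h <;> decide
      simp only [hmem, not_true_eq_false, if_false]
      rcases hpm with h|h <;> subst h <;> simp [isrightLoop_pos]
    · push_neg at hpm
      by_cases hmem : c ∈ isrightAllstring
      · have hd := mem_digit c hmem hpm.1 hpm.2
        simp [hmem, hpm.1, hpm.2, isrightLoop_pos, hd]
      · have hd : isrightDigit c = false := by
          rcases Bool.eq_false_or_eq_true (isrightDigit c) with hh | hh
          · exfalso; exact hmem (digit_mem c hh)
          · exact hh
        simp [hmem, hpm.1, hpm.2, hd]
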